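-- pv_equiv track=rewrite | github.com/ydb-platform/ydb | contrib/python/cmdstanpy/cmdstanpy/utils/stancsv.py | munge_varname
-- ===== SOURCE A (Python) =====
-- def munge_varname(name: str) -> str:
--     if '.' not in name and ':' not in name:
--         return name
--
--     tuple_parts = name.split(':')
--     for i, part in enumerate(tuple_parts):
--         if '.' not in part:
--             continue
--         part = part.replace('.', '[', 1)
--         part = part.replace('.', ',')
--         part += ']'
--         tuple_parts[i] = part
--
--     return '.'.join(tuple_parts)
-- ===== SOURCE B (Python) =====
-- def munge_varname(name: str) -> str:
--     out = []
--     bracket_open = False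
--     for ch in name:
--         if ch == '.':
--             out.append(',' if bracket_open else '[')
--             bracket_open = True
--         elif ch == ':':
--             if bracket_open:
--                 out.append(']')
--             out.append('.')
--             bracket_open = False
--         else:
--             out.append(ch)
--     if bracket_open:
--         out.append(']')
--     return ''.join(out)
-- ===== Notes on version B (the rewrite author's own statement) =====
-- stated objective: simpler
-- what changed: Replaced split-on-colon / two string replaces / join with a single left-to-right character pass keeping one bracket_open flag, never building a parts list.
import Mathlib
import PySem

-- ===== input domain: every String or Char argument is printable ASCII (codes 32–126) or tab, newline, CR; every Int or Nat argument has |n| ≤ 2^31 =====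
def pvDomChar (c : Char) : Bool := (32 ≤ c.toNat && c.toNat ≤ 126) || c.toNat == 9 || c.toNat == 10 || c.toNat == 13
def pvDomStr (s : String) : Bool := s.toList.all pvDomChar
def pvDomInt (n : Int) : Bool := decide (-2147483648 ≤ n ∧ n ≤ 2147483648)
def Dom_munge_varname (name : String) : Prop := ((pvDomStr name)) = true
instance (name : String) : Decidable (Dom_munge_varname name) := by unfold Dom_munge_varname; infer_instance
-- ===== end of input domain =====

-- B replaces A's split-on-colon / replace / join pipeline by a single character pass with one bracket flag (simpler; same cost).

-- ===== PORT A =====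
-- exact hand port of part.replace('.', '[', 1) (PySem.Str.replace has no count parameter):
-- replaces the first '.' with '[' and leaves the rest of the segment unchanged
def pvReplaceFirstDot : List Char → List Char
  | [] => []
  | c :: t => if c = '.' then '[' :: t else c :: pvReplaceFirstDot t

def munge_varname (name : String) : String :=
  let cs := name.toList
  if !(PySem.Chars.isIn ['.'] cs) && !(PySem.Chars.isIn [':'] cs) then name
  else
    let parts := PySem.Chars.splitOn cs [':']
    let parts := parts.map (fun part =>
      if PySem.Chars.isIn ['.'] part then
        PySem.Chars.replace (pvReplaceFirstDot part) ['.'] [','] ++ [']']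
      else part)
    String.ofList (PySem.Chars.join ['.'] parts)

-- ===== PORT B =====
def pvStep (st : List Char × Bool) (c : Char) : List Char × Bool :=
  if c = '.' then (st.1 ++ [if st.2 then ',' else '['], true)
  else if c = ':' then ((st.1 ++ (if st.2 then [']'] else [])) ++ ['.'], false)
  else (st.1 ++ [c], st.2)

def munge_varname_alt (name : String) : String :=
  let st := name.toList.foldl pvStep ([], false)
  String.ofList (st.1 ++ if st.2 then [']'] else [])

-- ===== PRECONDITION & SPEC =====
def Spec_munge_varname (name : String) (out : String) : Prop := out = munge_varname_alt name
instance (name : String) (out : String) : Decidable (Spec_munge_varname name out) := by unfold Spec_munge_varname; infer_instance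

-- ===== CLAIM (what is proved, stated in full; the proofs are below) =====
def Claim_equal_munge_varname : Prop := ∀ (name : String), Dom_munge_varname name → Spec_munge_varname name (munge_varname name)

-- ===== LEMMAS AND PROOFS =====

-- spec-side vocabulary: dotComma maps '.' to ','; dotRepl1 is "first '.' -> '[', later '.' -> ','";
-- mungSpec is A's per-segment transform; mySplit is split on ':'; S is the output B still owes
-- given the remaining input and the bracket flag; mungState re-expresses A's result from the same state.
def dotComma (c : Char) : Char := if c = '.' then ',' else c

def dotRepl1 : List Char → List Char
  | [] => []
  | c :: t => if c = '.' then '[' :: t.map dotComma else c :: dotRepl1 t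

def mungSpec (p : List Char) : List Char :=
  if '.' ∈ p then dotRepl1 p ++ [']'] else p

def mungSeg (op : Bool) (p : List Char) : List Char :=
  if op then p.map dotComma ++ [']'] else mungSpec p

def mySplit : List Char → List (List Char)
  | [] => [[]]
  | c :: t => if c = ':' then [] :: mySplit t else
      match mySplit t with
      | [] => [[c]]
      | h :: r => (c :: h) :: r

def consHeadL (pre : List Char) : List (List Char) → List (List Char)
  | [] => [pre]
  | h :: r => (pre ++ h) :: r

def S : List Char → Bool → List Char
  | [], op => if op then [']'] else []
  | c :: t, op =>
    if c = '.' then (if op then ',' else '[') :: S t true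
    else if c = ':' then (if op then [']'] else []) ++ '.' :: S t false
    else c :: S t op

def mungState (op : Bool) : List (List Char) → List Char
  | [] => []
  | h :: t => mungSeg op h ++ t.flatMap (fun p => '.' :: mungSpec p)

theorem foldB (cs : List Char) : ∀ (acc : List Char) (op : Bool),
    (cs.foldl pvStep (acc, op)).1 ++ (if (cs.foldl pvStep (acc, op)).2 then [']'] else [])
      = acc ++ S cs op := by
  induction cs with
  | nil => intro acc op; simp [S]
  | cons c t ih =>
    intro acc op
    by_cases h1 : c = '.'
    · simp [pvStep, S, h1, ih]
    · by_cases h2 : c = ':'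
      · simp [pvStep, S, h1, h2, ih]
      · simp [pvStep, S, h1, h2, ih]

theorem mySplit_ne_nil (cs : List Char) : mySplit cs ≠ [] := by
  cases cs with
  | nil => simp [mySplit]
  | cons c t =>
    simp only [mySplit]
    split_ifs
    · simp
    · rcases h : mySplit t with _ | ⟨h', r⟩ <;> simp

theorem splitOn_go_eq (cs : List Char) : ∀ (fuel : Nat) (cur : List Char) (acc : List (List Char)),
    cs.length < fuel →
    PySem.Chars.splitOn.go [':'] fuel cs cur acc = acc.reverse ++ consHeadL cur.reverse (mySplit cs) := by
  induction cs with
  | nil =>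
    intro fuel cur acc h
    cases fuel with
    | zero => omega
    | succ f =>
      rw [PySem.Chars.splitOn.go.eq_def]
      simp [mySplit, consHeadL]
  | cons c t ih =>
    intro fuel cur acc h
    cases fuel with
    | zero => omega
    | succ f =>
      rcases hsp : mySplit t with _ | ⟨hh, r⟩
      · exact absurd hsp (mySplit_ne_nil t)
      by_cases hc : c = ':'
      · rw [PySem.Chars.splitOn.go.eq_def]
        simp only [List.isPrefixOf, hc, BEq.rfl, Bool.true_and]
        rw [show List.drop [':'].length (':' :: t) = t from rfl]
        rw [ih f [] (cur.reverse :: acc) (by simpa using h)]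
        simp [mySplit, hc, hsp, consHeadL]
      · rw [PySem.Chars.splitOn.go.eq_def]
        have hpre : [':'].isPrefixOf (c :: t) = false := by
          simp [List.isPrefixOf]
          exact fun hq => absurd hq.symm hc
        simp only [hpre, Bool.false_eq_true, if_false]
        rw [ih f (c :: cur) acc (by simpa using h)]
        simp [mySplit, hc, hsp, consHeadL]

theorem splitOn_eq (cs : List Char) : PySem.Chars.splitOn cs [':'] = mySplit cs := by
  rw [PySem.Chars.splitOn, splitOn_go_eq cs (cs.length + 1) [] [] (by omega)]
  rcases h : mySplit cs with _ | ⟨hh, r⟩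
  · exact absurd h (mySplit_ne_nil cs)
  · simp [consHeadL]

theorem replace_go_eq (cs : List Char) : ∀ (fuel : Nat) (acc : List Char), cs.length ≤ fuel →
    PySem.Chars.replace.go ['.'] [','] fuel cs acc = acc.reverse ++ cs.map dotComma := by
  induction cs with
  | nil =>
    intro fuel acc _
    cases fuel <;> simp [PySem.Chars.replace.go]
  | cons c t ih =>
    intro fuel acc h
    cases fuel with
    | zero => simp at h
    | succ f =>
      by_cases hc : c = '.'
      · rw [PySem.Chars.replace.go.eq_def]
        simp only [List.isPrefixOf, hc, BEq.rfl, Bool.true_and, List.isPrefixOf_nil_left, if_pos rfl]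
        rw [show List.drop ['.'].length ('.' :: t) = t from rfl]
        rw [ih f _ (by simpa using h)]
        simp [dotComma]
      · rw [PySem.Chars.replace.go.eq_def]
        have hpre : ['.'].isPrefixOf (c :: t) = false := by
          simp [List.isPrefixOf]
          exact fun hq => absurd hq.symm hc
        simp only [hpre, Bool.false_eq_true, if_false]
        rw [ih f _ (by simpa using h)]
        simp [dotComma, hc]

theorem replace_eq (q : List Char) : PySem.Chars.replace q ['.'] [','] = q.map dotComma := by
  rw [PySem.Chars.replace]
  simp [replace_go_eq q q.length [] le_rfl]

theorem map_dotComma_pvRFD (p : List Char) : (pvReplaceFirstDot p).map dotComma = dotRepl1 p := by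
  induction p with
  | nil => simp [pvReplaceFirstDot, dotRepl1]
  | cons c t ih =>
    by_cases hc : c = '.'
    · simp [pvReplaceFirstDot, dotRepl1, hc, dotComma]
    · simp [pvReplaceFirstDot, dotRepl1, hc, dotComma, ih]

theorem isIn_single (c : Char) (p : List Char) : PySem.Chars.isIn [c] p = decide (c ∈ p) := by
  rcases h : decide (c ∈ p) with _ | _
  · simp only [decide_eq_false_iff_not] at h
    rw [← Bool.not_eq_true, PySem.Chars.isIn_iff_infix]
    intro hinf
    exact h (List.singleton_sublist.mp hinf.sublist)
  · simp only [decide_eq_true_eq] at h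
    rw [PySem.Chars.isIn_iff_infix]
    obtain ⟨s, t, rfl⟩ := List.append_of_mem h
    exact ⟨s, t, by simp⟩

theorem mungSeg_cons (op : Bool) (c : Char) (h : List Char) (h1 : c ≠ '.') (h2 : c ≠ ':') :
    mungSeg op (c :: h) = c :: mungSeg op h := by
  cases op with
  | true => simp [mungSeg, dotComma, h1]
  | false =>
    by_cases hd : '.' ∈ h
    · simp [mungSeg, mungSpec, dotRepl1, h1, hd, Ne.symm h1]
    · simp [mungSeg, mungSpec, dotRepl1, h1, hd, Ne.symm h1]

theorem S_eq_mungState (cs : List Char) : ∀ (op : Bool), S cs op = mungState op (mySplit cs) := by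
  induction cs with
  | nil =>
    intro op
    cases op <;> simp [S, mySplit, mungState, mungSeg, mungSpec]
  | cons c t ih =>
    intro op
    rcases hsp : mySplit t with _ | ⟨h, r⟩
    · exact absurd hsp (mySplit_ne_nil t)
    by_cases h1 : c = '.'
    · have hm : mySplit (c :: t) = (c :: h) :: r := by
        simp [mySplit, h1, hsp]
      rw [show S (c :: t) op = (if op then ',' else '[') :: S t true by simp [S, h1]]
      rw [hm, ih true, hsp]
      cases op <;> simp [mungState, mungSeg, mungSpec, h1, dotRepl1, dotComma]
    · by_cases h2 : c = ':'
      · have hm : mySplit (c :: t) = [] :: mySplit t := by simp [mySplit, h2]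
        rw [show S (c :: t) op = (if op then [']'] else []) ++ '.' :: S t false by simp [S, h1, h2]]
        rw [hm, ih false, hsp]
        cases op <;> simp [mungState, mungSeg, mungSpec]
      · have hm : mySplit (c :: t) = (c :: h) :: r := by
          simp [mySplit, h1, h2, hsp]
        rw [show S (c :: t) op = c :: S t op by simp [S, h1, h2]]
        rw [hm, ih op, hsp]
        simp [mungState, mungSeg_cons op c h h1 h2]

theorem S_id (cs : List Char) (hd : '.' ∉ cs) (hc : ':' ∉ cs) : S cs false = cs := by
  induction cs with
  | nil => simp [S]
  | cons c t ih =>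
    simp only [List.mem_cons, not_or] at hd hc
    simp [S, Ne.symm hd.1, Ne.symm hc.1, ih hd.2 hc.2]

theorem join_cons (h : List Char) (t : List (List Char)) :
    PySem.Chars.join ['.'] (h :: t) = h ++ t.flatMap (fun p => '.' :: p) := by
  induction t generalizing h with
  | nil => simp [PySem.Chars.join_singleton]
  | cons h' t' ih => simp [PySem.Chars.join_cons_cons, ih]

theorem mungA_eq (p : List Char) :
    (if PySem.Chars.isIn ['.'] p then
        PySem.Chars.replace (pvReplaceFirstDot p) ['.'] [','] ++ [']'] else p) = mungSpec p := by
  rw [isIn_single, replace_eq, map_dotComma_pvRFD, mungSpec]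
  by_cases hd : '.' ∈ p <;> simp [hd]

-- ===== VERDICT (by name: the statement is the Claim_ definition above) =====
theorem munge_varname_spec : Claim_equal_munge_varname := by
  intro name _
  unfold Spec_munge_varname
  have hB : munge_varname_alt name = String.ofList (S name.toList false) := by
    simp only [munge_varname_alt]
    rw [foldB]
    simp
  rw [hB]
  simp only [munge_varname]
  split_ifs with hcond
  · -- early return: no '.' and no ':' in name
    simp only [Bool.and_eq_true, Bool.not_eq_true'] at hcond
    rw [isIn_single, decide_eq_false_iff_not] at hcond
    obtain ⟨hd, hc⟩ := hcond
    rw [isIn_single, decide_eq_false_iff_not] at hc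
    rw [S_id name.toList hd hc]
    exact String.ofList_toList.symm
  · rw [splitOn_eq, S_eq_mungState]
    congr 1
    rcases hsp : mySplit name.toList with _ | ⟨h, r⟩
    · exact absurd hsp (mySplit_ne_nil name.toList)
    simp only [List.map_cons, join_cons, mungA_eq, mungState, List.flatMap_map]
    rw [show mungSeg false h = mungSpec h from rfl]
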